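-- pv_equiv track=rewrite | github.com/passing2961/DribeR | eval.py | map_multiple_answer_to_int
-- ===== SOURCE A (Python) =====
-- def map_multiple_answer_to_int(model_responses):
--     """
--     Maps multiple-choice answers to integer values.
--     """
--     output = []
--     for model_response in model_responses:
--         if isinstance(model_response, tuple):
--             #pred_label = -1
--             continue
--         else:
--             model_answer = model_response.lower()
--             if "information dissemination" in model_answer or "(a)" in model_answer or "a" == model_answer:
--                 pred_label = 0
--             elif "social bonding" in model_answer or "(b)" in model_answer or "b" == model_answer:
--                 pred_label = 1
--             elif "humor and entertainment" in model_answer or "(c)" in model_answer or "c" == model_answer: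
--                 pred_label = 2
--             elif "visual clarification" in model_answer or "(d)" in model_answer or "d" == model_answer:
--                 pred_label = 3
--             elif "topic transition" in model_answer or "(e)" in model_answer or "e" == model_answer:
--                 pred_label = 4
--             elif "expression of emotion or opinion" in model_answer or "(f)" in model_answer or "f" == model_answer:
--                 pred_label = 5
--             else:
--                 #pred_label = -1
--                 continue
--
--         output.append(pred_label)
--     return output
-- ===== SOURCE B (Python) =====
-- PHRASES = [
--     ("information dissemination", 0),
--     ("social bonding", 1),
--     ("humor and entertainment", 2),
--     ("visual clarification", 3),
--     ("topic transition", 4),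
--     ("expression of emotion or opinion", 5),
-- ]
--
--
-- def map_multiple_answer_to_int(model_responses):
--     output = []
--     for model_response in model_responses:
--         if isinstance(model_response, tuple):
--             continue
--         ans = model_response.lower()
--         # collect ALL matching labels from three independent detectors,
--         # then keep the smallest one (= the highest-priority rule)
--         cands = [lab for ph, lab in PHRASES if ph in ans]
--         cands += [i for i, c in enumerate("abcdef") if "(" + c + ")" in ans]
--         if ans in ("a", "b", "c", "d", "e", "f"):
--             cands.append(ord(ans) - 97)
--         if cands:
--             output.append(min(cands))
--     return output
-- ===== Notes on version B (the rewrite author's own statement) =====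
-- stated objective: alternative
-- what changed: Instead of A's first-match if/elif cascade, B runs three independent detectors (phrase list, parenthesised letters, bare letter) to collect ALL matching labels per response and appends the minimum, which equals the highest-priority branch.
import Mathlib
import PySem

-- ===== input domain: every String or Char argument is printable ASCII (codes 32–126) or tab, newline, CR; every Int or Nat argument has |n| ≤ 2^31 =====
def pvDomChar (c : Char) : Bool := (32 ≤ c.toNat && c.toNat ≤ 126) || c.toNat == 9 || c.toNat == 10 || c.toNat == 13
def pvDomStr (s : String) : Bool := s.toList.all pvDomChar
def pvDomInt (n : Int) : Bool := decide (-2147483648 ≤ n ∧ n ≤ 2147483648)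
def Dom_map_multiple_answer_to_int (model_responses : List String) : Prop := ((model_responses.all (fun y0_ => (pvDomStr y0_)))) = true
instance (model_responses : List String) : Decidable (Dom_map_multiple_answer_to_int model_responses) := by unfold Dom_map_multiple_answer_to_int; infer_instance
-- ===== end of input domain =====

-- B collects all matching labels per response via three independent detectors and takes
-- the minimum, instead of A's first-match if/elif cascade (objective: alternative).
-- On List String inputs the Python tuple-skip branch never fires, so it has no Lean counterpart.

-- ===== PORT A =====
def map_multiple_answer_to_int (model_responses : List String) : List Int :=
  model_responses.foldl (fun output model_response =>
    let model_answer := PySem.Str.lower model_response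
    if PySem.Str.isIn "information dissemination" model_answer || PySem.Str.isIn "(a)" model_answer || "a" == model_answer then
      output ++ [(0 : Int)]
    else if PySem.Str.isIn "social bonding" model_answer || PySem.Str.isIn "(b)" model_answer || "b" == model_answer then
      output ++ [(1 : Int)]
    else if PySem.Str.isIn "humor and entertainment" model_answer || PySem.Str.isIn "(c)" model_answer || "c" == model_answer then
      output ++ [(2 : Int)]
    else if PySem.Str.isIn "visual clarification" model_answer || PySem.Str.isIn "(d)" model_answer || "d" == model_answer then
      output ++ [(3 : Int)]
    else if PySem.Str.isIn "topic transition" model_answer || PySem.Str.isIn "(e)" model_answer || "e" == model_answer then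
      output ++ [(4 : Int)]
    else if PySem.Str.isIn "expression of emotion or opinion" model_answer || PySem.Str.isIn "(f)" model_answer || "f" == model_answer then
      output ++ [(5 : Int)]
    else
      output) []

-- ===== PORT B =====
def pvPhrases : List (String × Int) :=
  [ ("information dissemination", 0), ("social bonding", 1), ("humor and entertainment", 2),
    ("visual clarification", 3), ("topic transition", 4), ("expression of emotion or opinion", 5) ]

-- the candidate labels of one lowercased answer: all phrase hits, all "(x)" hits, the bare-letter hit
def pvCands (ans : String) : List Int :=
  let cands := pvPhrases.filterMap (fun p => if PySem.Str.isIn p.1 ans then some p.2 else none)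
  let cands := cands ++ (PySem.List.enumerate "abcdef".toList).filterMap
      (fun ic => if PySem.Str.isIn (String.ofList ['(', ic.2, ')']) ans then some ic.1 else none)
  if ["a", "b", "c", "d", "e", "f"].contains ans then
    cands ++ [(ans.toList.headI.toNat : Int) - 97]
  else cands

def map_multiple_answer_to_int_alt (model_responses : List String) : List Int :=
  model_responses.foldl (fun output model_response =>
    match PySem.List.min? (pvCands (PySem.Str.lower model_response)) (fun y => y) with
    | some m => output ++ [m]
    | none => output) []
-- ===== PRECONDITION & SPEC =====
def Spec_map_multiple_answer_to_int (model_responses : List String) (out : List Int) : Prop := out = map_multiple_answer_to_int_alt model_responses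
instance (model_responses : List String) (out : List Int) : Decidable (Spec_map_multiple_answer_to_int model_responses out) := by unfold Spec_map_multiple_answer_to_int; infer_instance

-- ===== CLAIM (what is proved, stated in full; the proofs are below) =====
def Claim_equal_map_multiple_answer_to_int : Prop := ∀ (model_responses : List String), Dom_map_multiple_answer_to_int model_responses → Spec_map_multiple_answer_to_int model_responses (map_multiple_answer_to_int model_responses)

-- ===== LEMMAS AND PROOFS =====
-- a list whose member m is a lower bound of all members has minimum m
theorem pv_min?_eq (xs : List Int) (m : Int) (h1 : m ∈ xs) (h2 : ∀ x ∈ xs, m ≤ x) :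
    PySem.List.min? xs (fun y => y) = some m := by
  cases h : PySem.List.min? xs (fun y => y) with
  | none =>
    rw [PySem.List.min?_eq_none_iff] at h
    subst h; cases h1
  | some m' =>
    have hm' : m' ∈ xs := PySem.List.min?_mem h
    have h3 := PySem.List.min?_isMin h m h1
    have h4 := h2 m' hm'
    simp only [Option.some.injEq]
    omega

-- the candidate list contains exactly the labels whose branch condition holds
set_option maxHeartbeats 1000000 in
theorem pv_mem_cands (ans : String) (m : Int) :
    m ∈ pvCands ans ↔
      ((m = 0 ∧ (PySem.Str.isIn "information dissemination" ans || PySem.Str.isIn "(a)" ans || ("a" == ans)) = true) ∨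
      (m = 1 ∧ (PySem.Str.isIn "social bonding" ans || PySem.Str.isIn "(b)" ans || ("b" == ans)) = true) ∨
      (m = 2 ∧ (PySem.Str.isIn "humor and entertainment" ans || PySem.Str.isIn "(c)" ans || ("c" == ans)) = true) ∨
      (m = 3 ∧ (PySem.Str.isIn "visual clarification" ans || PySem.Str.isIn "(d)" ans || ("d" == ans)) = true) ∨
      (m = 4 ∧ (PySem.Str.isIn "topic transition" ans || PySem.Str.isIn "(e)" ans || ("e" == ans)) = true) ∨
      (m = 5 ∧ (PySem.Str.isIn "expression of emotion or opinion" ans || PySem.Str.isIn "(f)" ans || ("f" == ans)) = true)) := by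
  by_cases hc : ans = "a" ∨ ans = "b" ∨ ans = "c" ∨ ans = "d" ∨ ans = "e" ∨ ans = "f"
  · rcases hc with h|h|h|h|h|h
    · subst h
      rw [show pvCands "a" = [(0:Int)] from by decide]
      simp only [List.mem_singleton]
      constructor
      · rintro rfl
        exact (Or.inl ⟨rfl, by decide⟩)
      · rintro (⟨hm, hb0⟩ | ⟨hm, hb1⟩ | ⟨hm, hb2⟩ | ⟨hm, hb3⟩ | ⟨hm, hb4⟩ | ⟨hm, hb5⟩)
        · exact hm
        · exact absurd hb1 (by decide)
        · exact absurd hb2 (by decide)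
        · exact absurd hb3 (by decide)
        · exact absurd hb4 (by decide)
        · exact absurd hb5 (by decide)
    · subst h
      rw [show pvCands "b" = [(1:Int)] from by decide]
      simp only [List.mem_singleton]
      constructor
      · rintro rfl
        exact (Or.inr (Or.inl ⟨rfl, by decide⟩))
      · rintro (⟨hm, hb0⟩ | ⟨hm, hb1⟩ | ⟨hm, hb2⟩ | ⟨hm, hb3⟩ | ⟨hm, hb4⟩ | ⟨hm, hb5⟩)
        · exact absurd hb0 (by decide)
        · exact hm
        · exact absurd hb2 (by decide)
        · exact absurd hb3 (by decide)
        · exact absurd hb4 (by decide)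
        · exact absurd hb5 (by decide)
    · subst h
      rw [show pvCands "c" = [(2:Int)] from by decide]
      simp only [List.mem_singleton]
      constructor
      · rintro rfl
        exact (Or.inr (Or.inr (Or.inl ⟨rfl, by decide⟩)))
      · rintro (⟨hm, hb0⟩ | ⟨hm, hb1⟩ | ⟨hm, hb2⟩ | ⟨hm, hb3⟩ | ⟨hm, hb4⟩ | ⟨hm, hb5⟩)
        · exact absurd hb0 (by decide)
        · exact absurd hb1 (by decide)
        · exact hm
        · exact absurd hb3 (by decide)
        · exact absurd hb4 (by decide)
        · exact absurd hb5 (by decide)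
    · subst h
      rw [show pvCands "d" = [(3:Int)] from by decide]
      simp only [List.mem_singleton]
      constructor
      · rintro rfl
        exact (Or.inr (Or.inr (Or.inr (Or.inl ⟨rfl, by decide⟩))))
      · rintro (⟨hm, hb0⟩ | ⟨hm, hb1⟩ | ⟨hm, hb2⟩ | ⟨hm, hb3⟩ | ⟨hm, hb4⟩ | ⟨hm, hb5⟩)
        · exact absurd hb0 (by decide)
        · exact absurd hb1 (by decide)
        · exact absurd hb2 (by decide)
        · exact hm
        · exact absurd hb4 (by decide)
        · exact absurd hb5 (by decide)
    · subst h
      rw [show pvCands "e" = [(4:Int)] from by decide]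
      simp only [List.mem_singleton]
      constructor
      · rintro rfl
        exact (Or.inr (Or.inr (Or.inr (Or.inr (Or.inl ⟨rfl, by decide⟩)))))
      · rintro (⟨hm, hb0⟩ | ⟨hm, hb1⟩ | ⟨hm, hb2⟩ | ⟨hm, hb3⟩ | ⟨hm, hb4⟩ | ⟨hm, hb5⟩)
        · exact absurd hb0 (by decide)
        · exact absurd hb1 (by decide)
        · exact absurd hb2 (by decide)
        · exact absurd hb3 (by decide)
        · exact hm
        · exact absurd hb5 (by decide)
    · subst h
      rw [show pvCands "f" = [(5:Int)] from by decide]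
      simp only [List.mem_singleton]
      constructor
      · rintro rfl
        exact (Or.inr (Or.inr (Or.inr (Or.inr (Or.inr ⟨rfl, by decide⟩)))))
      · rintro (⟨hm, hb0⟩ | ⟨hm, hb1⟩ | ⟨hm, hb2⟩ | ⟨hm, hb3⟩ | ⟨hm, hb4⟩ | ⟨hm, hb5⟩)
        · exact absurd hb0 (by decide)
        · exact absurd hb1 (by decide)
        · exact absurd hb2 (by decide)
        · exact absurd hb3 (by decide)
        · exact absurd hb4 (by decide)
        · exact hm
  · rw [not_or, not_or, not_or, not_or, not_or] at hc
    obtain ⟨e1,e2,e3,e4,e5,e6⟩ := hc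
    simp [pvCands, pvPhrases, PySem.List.enumerate, List.mem_filterMap,
      Option.ite_none_right_eq_some, beq_iff_eq, e1, e2, e3, e4, e5, e6,
      Ne.symm e1, Ne.symm e2, Ne.symm e3, Ne.symm e4, Ne.symm e5, Ne.symm e6]
    constructor
    · rintro ((⟨b, rfl⟩ | ⟨b, rfl⟩ | ⟨b, rfl⟩ | ⟨b, rfl⟩ | ⟨b, rfl⟩ | ⟨b, rfl⟩) | ⟨b, rfl⟩ | ⟨b, rfl⟩ | ⟨b, rfl⟩ | ⟨b, rfl⟩ | ⟨b, rfl⟩ | ⟨b, rfl⟩)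
      · exact (Or.inl ⟨rfl, Or.inl b⟩)
      · exact (Or.inr (Or.inl ⟨rfl, Or.inl b⟩))
      · exact (Or.inr (Or.inr (Or.inl ⟨rfl, Or.inl b⟩)))
      · exact (Or.inr (Or.inr (Or.inr (Or.inl ⟨rfl, Or.inl b⟩))))
      · exact (Or.inr (Or.inr (Or.inr (Or.inr (Or.inl ⟨rfl, Or.inl b⟩)))))
      · exact (Or.inr (Or.inr (Or.inr (Or.inr (Or.inr ⟨rfl, Or.inl b⟩)))))
      · exact (Or.inl ⟨rfl, Or.inr b⟩)
      · exact (Or.inr (Or.inl ⟨rfl, Or.inr b⟩))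
      · exact (Or.inr (Or.inr (Or.inl ⟨rfl, Or.inr b⟩)))
      · exact (Or.inr (Or.inr (Or.inr (Or.inl ⟨rfl, Or.inr b⟩))))
      · exact (Or.inr (Or.inr (Or.inr (Or.inr (Or.inl ⟨rfl, Or.inr b⟩)))))
      · exact (Or.inr (Or.inr (Or.inr (Or.inr (Or.inr ⟨rfl, Or.inr b⟩)))))
    · rintro (⟨rfl, b | b⟩ | ⟨rfl, b | b⟩ | ⟨rfl, b | b⟩ | ⟨rfl, b | b⟩ | ⟨rfl, b | b⟩ | ⟨rfl, b | b⟩)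
      · exact Or.inl (Or.inl ⟨b, rfl⟩)
      · exact Or.inr (Or.inl ⟨b, rfl⟩)
      · exact Or.inl (Or.inr (Or.inl ⟨b, rfl⟩))
      · exact Or.inr (Or.inr (Or.inl ⟨b, rfl⟩))
      · exact Or.inl (Or.inr (Or.inr (Or.inl ⟨b, rfl⟩)))
      · exact Or.inr (Or.inr (Or.inr (Or.inl ⟨b, rfl⟩)))
      · exact Or.inl (Or.inr (Or.inr (Or.inr (Or.inl ⟨b, rfl⟩))))
      · exact Or.inr (Or.inr (Or.inr (Or.inr (Or.inl ⟨b, rfl⟩))))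
      · exact Or.inl (Or.inr (Or.inr (Or.inr (Or.inr (Or.inl ⟨b, rfl⟩)))))
      · exact Or.inr (Or.inr (Or.inr (Or.inr (Or.inr (Or.inl ⟨b, rfl⟩)))))
      · exact Or.inl (Or.inr (Or.inr (Or.inr (Or.inr (Or.inr ⟨b, rfl⟩)))))
      · exact Or.inr (Or.inr (Or.inr (Or.inr (Or.inr (Or.inr ⟨b, rfl⟩)))))


-- one fold step of A (the cascade) equals one fold step of B (min of all candidates)
theorem pv_step_core (output : List Int) (ans : String) :
    (if (PySem.Str.isIn "information dissemination" ans || PySem.Str.isIn "(a)" ans || ("a" == ans)) = true then output ++ [(0 : Int)]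
      else if (PySem.Str.isIn "social bonding" ans || PySem.Str.isIn "(b)" ans || ("b" == ans)) = true then output ++ [(1 : Int)]
      else if (PySem.Str.isIn "humor and entertainment" ans || PySem.Str.isIn "(c)" ans || ("c" == ans)) = true then output ++ [(2 : Int)]
      else if (PySem.Str.isIn "visual clarification" ans || PySem.Str.isIn "(d)" ans || ("d" == ans)) = true then output ++ [(3 : Int)]
      else if (PySem.Str.isIn "topic transition" ans || PySem.Str.isIn "(e)" ans || ("e" == ans)) = true then output ++ [(4 : Int)]
      else if (PySem.Str.isIn "expression of emotion or opinion" ans || PySem.Str.isIn "(f)" ans || ("f" == ans)) = true then output ++ [(5 : Int)]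
      else output)
    = (match PySem.List.min? (pvCands ans) (fun y => y) with
       | some m => output ++ [m]
       | none => output) := by
  by_cases h0 : (PySem.Str.isIn "information dissemination" ans || PySem.Str.isIn "(a)" ans || ("a" == ans)) = true
  · have hmin : PySem.List.min? (pvCands ans) (fun y => y) = some 0 := by
      apply pv_min?_eq
      · exact (pv_mem_cands ans 0).mpr (Or.inl ⟨rfl, h0⟩)
      · intro x hx
        rcases (pv_mem_cands ans x).mp hx with ⟨rfl, hb0⟩ | ⟨rfl, hb1⟩ | ⟨rfl, hb2⟩ | ⟨rfl, hb3⟩ | ⟨rfl, hb4⟩ | ⟨rfl, hb5⟩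
        · omega
        · omega
        · omega
        · omega
        · omega
        · omega
    rw [if_pos h0, hmin]
  by_cases h1 : (PySem.Str.isIn "social bonding" ans || PySem.Str.isIn "(b)" ans || ("b" == ans)) = true
  · have hmin : PySem.List.min? (pvCands ans) (fun y => y) = some 1 := by
      apply pv_min?_eq
      · exact (pv_mem_cands ans 1).mpr (Or.inr (Or.inl ⟨rfl, h1⟩))
      · intro x hx
        rcases (pv_mem_cands ans x).mp hx with ⟨rfl, hb0⟩ | ⟨rfl, hb1⟩ | ⟨rfl, hb2⟩ | ⟨rfl, hb3⟩ | ⟨rfl, hb4⟩ | ⟨rfl, hb5⟩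
        · exact absurd hb0 h0
        · omega
        · omega
        · omega
        · omega
        · omega
    rw [if_neg h0, if_pos h1, hmin]
  by_cases h2 : (PySem.Str.isIn "humor and entertainment" ans || PySem.Str.isIn "(c)" ans || ("c" == ans)) = true
  · have hmin : PySem.List.min? (pvCands ans) (fun y => y) = some 2 := by
      apply pv_min?_eq
      · exact (pv_mem_cands ans 2).mpr (Or.inr (Or.inr (Or.inl ⟨rfl, h2⟩)))
      · intro x hx
        rcases (pv_mem_cands ans x).mp hx with ⟨rfl, hb0⟩ | ⟨rfl, hb1⟩ | ⟨rfl, hb2⟩ | ⟨rfl, hb3⟩ | ⟨rfl, hb4⟩ | ⟨rfl, hb5⟩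
        · exact absurd hb0 h0
        · exact absurd hb1 h1
        · omega
        · omega
        · omega
        · omega
    rw [if_neg h0, if_neg h1, if_pos h2, hmin]
  by_cases h3 : (PySem.Str.isIn "visual clarification" ans || PySem.Str.isIn "(d)" ans || ("d" == ans)) = true
  · have hmin : PySem.List.min? (pvCands ans) (fun y => y) = some 3 := by
      apply pv_min?_eq
      · exact (pv_mem_cands ans 3).mpr (Or.inr (Or.inr (Or.inr (Or.inl ⟨rfl, h3⟩))))
      · intro x hx
        rcases (pv_mem_cands ans x).mp hx with ⟨rfl, hb0⟩ | ⟨rfl, hb1⟩ | ⟨rfl, hb2⟩ | ⟨rfl, hb3⟩ | ⟨rfl, hb4⟩ | ⟨rfl, hb5⟩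
        · exact absurd hb0 h0
        · exact absurd hb1 h1
        · exact absurd hb2 h2
        · omega
        · omega
        · omega
    rw [if_neg h0, if_neg h1, if_neg h2, if_pos h3, hmin]
  by_cases h4 : (PySem.Str.isIn "topic transition" ans || PySem.Str.isIn "(e)" ans || ("e" == ans)) = true
  · have hmin : PySem.List.min? (pvCands ans) (fun y => y) = some 4 := by
      apply pv_min?_eq
      · exact (pv_mem_cands ans 4).mpr (Or.inr (Or.inr (Or.inr (Or.inr (Or.inl ⟨rfl, h4⟩)))))
      · intro x hx
        rcases (pv_mem_cands ans x).mp hx with ⟨rfl, hb0⟩ | ⟨rfl, hb1⟩ | ⟨rfl, hb2⟩ | ⟨rfl, hb3⟩ | ⟨rfl, hb4⟩ | ⟨rfl, hb5⟩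
        · exact absurd hb0 h0
        · exact absurd hb1 h1
        · exact absurd hb2 h2
        · exact absurd hb3 h3
        · omega
        · omega
    rw [if_neg h0, if_neg h1, if_neg h2, if_neg h3, if_pos h4, hmin]
  by_cases h5 : (PySem.Str.isIn "expression of emotion or opinion" ans || PySem.Str.isIn "(f)" ans || ("f" == ans)) = true
  · have hmin : PySem.List.min? (pvCands ans) (fun y => y) = some 5 := by
      apply pv_min?_eq
      · exact (pv_mem_cands ans 5).mpr (Or.inr (Or.inr (Or.inr (Or.inr (Or.inr ⟨rfl, h5⟩)))))
      · intro x hx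
        rcases (pv_mem_cands ans x).mp hx with ⟨rfl, hb0⟩ | ⟨rfl, hb1⟩ | ⟨rfl, hb2⟩ | ⟨rfl, hb3⟩ | ⟨rfl, hb4⟩ | ⟨rfl, hb5⟩
        · exact absurd hb0 h0
        · exact absurd hb1 h1
        · exact absurd hb2 h2
        · exact absurd hb3 h3
        · exact absurd hb4 h4
        · omega
    rw [if_neg h0, if_neg h1, if_neg h2, if_neg h3, if_neg h4, if_pos h5, hmin]
  · have hnil : pvCands ans = [] := by
      rw [List.eq_nil_iff_forall_not_mem]
      intro x hx
      rcases (pv_mem_cands ans x).mp hx with ⟨rfl, hb0⟩ | ⟨rfl, hb1⟩ | ⟨rfl, hb2⟩ | ⟨rfl, hb3⟩ | ⟨rfl, hb4⟩ | ⟨rfl, hb5⟩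
      · exact h0 hb0
      · exact h1 hb1
      · exact h2 hb2
      · exact h3 hb3
      · exact h4 hb4
      · exact h5 hb5
    rw [if_neg h0, if_neg h1, if_neg h2, if_neg h3, if_neg h4, if_neg h5, hnil]
    simp [PySem.List.min?]

-- ===== VERDICT (by name: the statement is the Claim_ definition above) =====
theorem map_multiple_answer_to_int_spec : Claim_equal_map_multiple_answer_to_int := by
  intro rs _
  unfold Spec_map_multiple_answer_to_int map_multiple_answer_to_int map_multiple_answer_to_int_alt
  congr 1
  funext output r
  exact pv_step_core output (PySem.Str.lower r)
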